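-- pv_equiv track=rewrite | github.com/karanm6505/Advanced-Data-Analytics | run_xgboost.py | build_category_mapping
-- ===== SOURCE A (Python) =====
-- from typing import Dict, List, Tuple
--
-- CATEGORICAL_KEY = "wnd_dir"
--
-- def build_category_mapping(feature_rows: List[Dict[str, float]]) -> Dict[str, int]:
--     """Generate a stable mapping for categorical wind direction values."""
--     categories = {
--         (row.get(CATEGORICAL_KEY) or "UNK").strip() or "UNK"
--         for row in feature_rows
--     }
--     categories.discard("UNK")
--     ordered = ["UNK"] + sorted(categories)
--     return {category: idx for idx, category in enumerate(ordered)}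
-- ===== SOURCE B (Python) =====
-- from typing import Dict, List, Tuple
--
-- CATEGORICAL_KEY = "wnd_dir"
--
-- def build_category_mapping(feature_rows):
--     """Generate a stable mapping for categorical wind direction values."""
--     vals = sorted((row.get(CATEGORICAL_KEY) or "UNK").strip() or "UNK"
--                   for row in feature_rows)
--     uniq = []
--     prev = None
--     for v in vals:
--         if v != "UNK" and v != prev:
--             uniq.append(v)
--             prev = v
--     mapping = {"UNK": 0}
--     for i, v in enumerate(uniq, 1):
--         mapping[v] = i
--     return mapping
-- ===== Notes on version B (the rewrite author's own statement) =====
-- stated objective: alternative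
-- what changed: Replaces set-comprehension dedup + discard + sort with sort of the full cleaned list followed by a single linear scan that skips adjacent duplicates and 'UNK', then an enumerate pass starting from {'UNK': 0}.
import Mathlib
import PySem

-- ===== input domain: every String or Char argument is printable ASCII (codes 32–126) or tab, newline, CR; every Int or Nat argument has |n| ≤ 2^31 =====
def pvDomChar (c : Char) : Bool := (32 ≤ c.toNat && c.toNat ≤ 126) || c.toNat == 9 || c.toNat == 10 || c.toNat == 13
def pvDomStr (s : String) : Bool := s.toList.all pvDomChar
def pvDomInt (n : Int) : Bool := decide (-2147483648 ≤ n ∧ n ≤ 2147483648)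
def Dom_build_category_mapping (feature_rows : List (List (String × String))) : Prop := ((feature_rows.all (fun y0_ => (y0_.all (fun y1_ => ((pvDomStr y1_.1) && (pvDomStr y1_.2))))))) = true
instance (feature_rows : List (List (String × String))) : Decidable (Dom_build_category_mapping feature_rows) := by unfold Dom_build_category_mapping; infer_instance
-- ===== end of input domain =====

-- B is an alternative decomposition: sort the full cleaned list once, dedup adjacent entries
-- (skipping 'UNK') in a single scan, then enumerate from {'UNK': 0}; same cost as A.

-- ===== PORT A =====
-- (row.get(CATEGORICAL_KEY) or "UNK").strip() or "UNK"
def pvClean (row : List (String × String)) : String :=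
  let v := match PySem.Dict.get? ⟨row⟩ "wnd_dir" with
    | none => "UNK"
    | some s => if s = "" then "UNK" else s
  let s := PySem.Str.strip v
  if s = "" then "UNK" else s

def build_category_mapping (feature_rows : List (List (String × String))) : List (String × Int) :=
  let categories : PySem.Set String := PySem.Set.ofList (feature_rows.map pvClean)
  let categories := PySem.Set.discard categories "UNK"
  let ordered := "UNK" :: PySem.List.sorted categories (fun x => x) false
  ((PySem.List.enumerate ordered 0).foldl
    (fun (d : PySem.Dict String Int) p => PySem.Dict.insert d p.2 p.1) ⟨[]⟩).items

-- ===== PORT B =====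
def build_category_mapping_alt (feature_rows : List (List (String × String))) : List (String × Int) :=
  let vals := PySem.List.sorted (feature_rows.map pvClean) (fun x => x) false
  let st := vals.foldl
    (fun (acc : List String × Option String) v =>
      if v ≠ "UNK" ∧ some v ≠ acc.2 then (acc.1 ++ [v], some v) else acc)
    ([], none)
  let uniq := st.1
  ((PySem.List.enumerate uniq 1).foldl
    (fun (d : PySem.Dict String Int) p => PySem.Dict.insert d p.2 p.1) ⟨[("UNK", 0)]⟩).items

-- ===== PRECONDITION & SPEC =====
def Spec_build_category_mapping (feature_rows : List (List (String × String))) (out : List (String × Int)) : Prop := out = build_category_mapping_alt feature_rows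
instance (feature_rows : List (List (String × String))) (out : List (String × Int)) : Decidable (Spec_build_category_mapping feature_rows out) := by unfold Spec_build_category_mapping; infer_instance

-- ===== CLAIM (what is proved, stated in full; the proofs are below) =====
def Claim_equal_build_category_mapping : Prop := ∀ (feature_rows : List (List (String × String))), Dom_build_category_mapping feature_rows → Spec_build_category_mapping feature_rows (build_category_mapping feature_rows)

-- ===== LEMMAS AND PROOFS =====

-- the scan step of B
def pvStep (acc : List String × Option String) (v : String) : List String × Option String :=
  if v ≠ "UNK" ∧ some v ≠ acc.2 then (acc.1 ++ [v], some v) else acc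

-- invariant of B's dedup scan: on a ≤-sorted input it produces a <-sorted list containing
-- exactly the non-"UNK" values seen
theorem pvScan_inv (vals : List String) :
    ∀ (uniq : List String) (prev : Option String),
    vals.Pairwise (· ≤ ·) →
    uniq.Pairwise (· < ·) →
    (∀ u ∈ uniq, ∀ v ∈ vals, u ≤ v) →
    (match prev with | none => uniq = [] | some p => p ∈ uniq ∧ ∀ u ∈ uniq, u ≤ p) →
    (vals.foldl pvStep (uniq, prev)).1.Pairwise (· < ·) ∧
      ∀ x, x ∈ (vals.foldl pvStep (uniq, prev)).1 ↔ x ∈ uniq ∨ (x ∈ vals ∧ x ≠ "UNK") := by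
  induction vals with
  | nil => intro uniq prev _ h1 _ _; simpa using h1
  | cons v rest ih =>
    intro uniq prev hs h1 h2 h3
    have hvle : ∀ r ∈ rest, v ≤ r := fun r hr => (List.pairwise_cons.1 hs).1 r hr
    have hs' : rest.Pairwise (· ≤ ·) := (List.pairwise_cons.1 hs).2
    simp only [List.foldl_cons]
    by_cases hc : v ≠ "UNK" ∧ some v ≠ prev
    · -- appended
      have hlt : ∀ u ∈ uniq, u < v := by
        intro u hu
        match prev, h3 with
        | none, h3 => simp [h3] at hu
        | some p, ⟨hp, hle⟩ =>
          have hpv : p ≤ v := h2 p hp v (by simp)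
          have hpne : p ≠ v := fun h => hc.2 (by simp [h])
          exact lt_of_le_of_lt (hle u hu) (lt_of_le_of_ne hpv hpne)
      have hstep : pvStep (uniq, prev) v = (uniq ++ [v], some v) := by
        simp [pvStep, hc]
      rw [hstep]
      have h1' : (uniq ++ [v]).Pairwise (· < ·) := by
        rw [List.pairwise_append]
        exact ⟨h1, List.pairwise_singleton _ _, fun u hu w hw => by
          simp at hw; subst hw; exact hlt u hu⟩
      have h2' : ∀ u ∈ uniq ++ [v], ∀ r ∈ rest, u ≤ r := by
        intro u hu r hr
        rcases List.mem_append.1 hu with hu | hu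
        · exact h2 u hu r (by simp [hr])
        · simp at hu; subst hu; exact hvle r hr
      have h3' : v ∈ uniq ++ [v] ∧ ∀ u ∈ uniq ++ [v], u ≤ v := by
        refine ⟨by simp, fun u hu => ?_⟩
        rcases List.mem_append.1 hu with hu | hu
        · exact le_of_lt (hlt u hu)
        · simp at hu; subst hu; exact le_rfl
      obtain ⟨ha, hb⟩ := ih (uniq ++ [v]) (some v) hs' h1' h2' h3'
      refine ⟨ha, fun x => ?_⟩
      rw [hb x]
      constructor
      · rintro (hx | hx)
        · rcases List.mem_append.1 hx with hx | hx
          · exact Or.inl hx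
          · simp at hx; subst hx; exact Or.inr ⟨by simp, hc.1⟩
        · exact Or.inr ⟨by simp [hx.1], hx.2⟩
      · rintro (hx | ⟨hx, hne⟩)
        · exact Or.inl (List.mem_append.2 (Or.inl hx))
        · rcases List.mem_cons.1 hx with hx | hx
          · subst hx; exact Or.inl (by simp)
          · exact Or.inr ⟨hx, hne⟩
    · -- skipped
      have hstep : pvStep (uniq, prev) v = (uniq, prev) := by
        simp only [pvStep, if_neg hc]
      rw [hstep]
      have h2' : ∀ u ∈ uniq, ∀ r ∈ rest, u ≤ r := fun u hu r hr => h2 u hu r (by simp [hr])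
      obtain ⟨ha, hb⟩ := ih uniq prev hs' h1 h2' h3
      refine ⟨ha, fun x => ?_⟩
      rw [hb x]
      constructor
      · rintro (hx | hx)
        · exact Or.inl hx
        · exact Or.inr ⟨by simp [hx.1], hx.2⟩
      · rintro (hx | ⟨hx, hne⟩)
        · exact Or.inl hx
        · rcases List.mem_cons.1 hx with hx | hx
          · subst hx
            rcases not_and_or.1 hc with h | h
            · exact absurd hne (by simpa using h)
            · have hvp : some x = prev := by simpa using h
              match prev, h3, hvp with
              | some p, ⟨hp, _⟩, hvp =>
                have : x = p := by injection hvp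
                exact Or.inl (this ▸ hp)
          · exact Or.inr ⟨hx, hne⟩

-- the two deduplicated sorted lists coincide
theorem pvLists_eq (cleaned : List String) :
    PySem.List.sorted (PySem.Set.discard (PySem.Set.ofList cleaned) "UNK") (fun x => x) false =
    ((PySem.List.sorted cleaned (fun x => x) false).foldl pvStep ([], none)).1 := by
  set LA := PySem.List.sorted (PySem.Set.discard (PySem.Set.ofList cleaned) "UNK") (fun x => x) false with hLA
  set vals := PySem.List.sorted cleaned (fun x => x) false with hvals
  have hsorted : vals.Pairwise (· ≤ ·) := by
    simpa using PySem.List.sorted_pairwise cleaned (fun x => x)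
  obtain ⟨hBlt, hBmem⟩ := pvScan_inv vals [] none hsorted (by simp) (by simp) rfl
  set LB := (vals.foldl pvStep ([], none)).1
  have hAnodup : LA.Nodup :=
    ((PySem.List.sorted_perm _ _ _).nodup_iff).2
      (PySem.Set.nodup_discard _ _ (PySem.Set.nodup_ofList _))
  have hAle : LA.Pairwise (· ≤ ·) := by
    simpa using PySem.List.sorted_pairwise (PySem.Set.discard (PySem.Set.ofList cleaned) "UNK") (fun x => x)
  have hAlt : LA.Pairwise (· < ·) :=
    (hAle.and hAnodup).imp (fun h => lt_of_le_of_ne h.1 h.2)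
  have hAmem : ∀ x, x ∈ LA ↔ x ∈ cleaned ∧ x ≠ "UNK" := by
    intro x
    rw [hLA, PySem.List.mem_sorted, PySem.Set.mem_discard, PySem.Set.mem_ofList]
  have hmem : ∀ x, x ∈ LA ↔ x ∈ LB := by
    intro x
    rw [hAmem x, hBmem x]
    simp [hvals, PySem.List.mem_sorted]
  have hBnodup : LB.Nodup := hBlt.imp ne_of_lt
  have hperm : LA.Perm LB := (List.perm_ext_iff_of_nodup hAnodup hBnodup).2 hmem
  exact PySem.List.eq_of_perm_of_pairwise_le_of_injective (fun x => x)
    (fun _ _ h => h) hperm (by simpa using hAlt.imp le_of_lt) (by simpa using hBlt.imp le_of_lt)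

-- ===== VERDICT (by name: the statement is the Claim_ definition above) =====
theorem build_category_mapping_spec : Claim_equal_build_category_mapping := by
  intro fr _
  have h := pvLists_eq (fr.map pvClean)
  unfold pvStep at h
  unfold Spec_build_category_mapping build_category_mapping build_category_mapping_alt
  dsimp only
  rw [← h, PySem.List.enumerate_cons]
  simp only [List.foldl_cons]
  rfl
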